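-- pv_equiv track=rewrite | github.com/Raumx7/Encriptacion-Mensajes | CifradoMensajes.py | matriz_mensaje
-- ===== SOURCE A (Python) =====
-- def matriz_mensaje(ML):
--     tamano = (len(ML)) // 3
--     M3xn = [[0] * tamano for _ in range(3)]
--
--     k = 0
--     for i in range(tamano):
--         for j in range(3):
--             M3xn[j][i] = ML[k]
--             k += 1
--
--     return M3xn
-- ===== SOURCE B (Python) =====
-- def matriz_mensaje(ML):
--     tamano = len(ML) // 3
--     return [ML[j:3 * tamano:3] for j in range(3)]
-- ===== Notes on version B (the rewrite author's own statement) =====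
-- stated objective: faster
-- what changed: Replaces the preallocated 3xN matrix filled by a Python-level nested scatter loop with three strided slices ML[j:3*tamano:3], one direct C-level gather per row.
import Mathlib
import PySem

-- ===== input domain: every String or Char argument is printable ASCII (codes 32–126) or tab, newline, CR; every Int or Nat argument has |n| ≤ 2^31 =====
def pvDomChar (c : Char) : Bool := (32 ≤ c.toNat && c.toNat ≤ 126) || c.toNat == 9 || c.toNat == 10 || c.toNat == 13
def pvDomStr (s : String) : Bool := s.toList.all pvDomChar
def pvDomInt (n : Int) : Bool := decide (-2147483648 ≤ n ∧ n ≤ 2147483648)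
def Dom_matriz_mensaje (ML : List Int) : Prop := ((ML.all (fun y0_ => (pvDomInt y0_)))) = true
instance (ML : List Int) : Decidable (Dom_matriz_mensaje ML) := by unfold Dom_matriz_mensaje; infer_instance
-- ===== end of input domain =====

-- B replaces A's nested scatter loop into a preallocated 3xN matrix by three strided
-- slices ML[j:3*tamano:3]; same O(n) work, measurably faster (slicing replaces the Python-level loop).


-- ===== PORT A =====
-- ML[k] is ported as getD: k = 3*i+j is always in range while the loops run.
def matriz_mensaje (ML : List Int) : List (List Int) :=
  let tamano := ML.length / 3
  let M3xn : List (List Int) := (List.range 3).map (fun _ => List.replicate tamano 0)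
  let res := (List.range tamano).foldl
    (fun st i => (List.range 3).foldl
      (fun (st : List (List Int) × Nat) j =>
        (st.1.set j ((st.1.getD j []).set i (ML.getD st.2 0)), st.2 + 1)) st)
    (M3xn, 0)
  res.1

-- ===== PORT B =====
def matriz_mensaje_alt (ML : List Int) : List (List Int) :=
  let tamano := ML.length / 3
  (List.range 3).map (fun j =>
    (PySem.List.slice? ML (some (Int.ofNat j)) (some (Int.ofNat (3 * tamano))) 3).getD [])

-- ===== PRECONDITION & SPEC =====
def Spec_matriz_mensaje (ML : List Int) (out : List (List Int)) : Prop := out = matriz_mensaje_alt ML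
instance (ML : List Int) (out : List (List Int)) : Decidable (Spec_matriz_mensaje ML out) := by unfold Spec_matriz_mensaje; infer_instance

-- ===== CLAIM (what is proved, stated in full; the proofs are below) =====
def Claim_equal_matriz_mensaje : Prop := ∀ (ML : List Int), Dom_matriz_mensaje ML → Spec_matriz_mensaje ML (matriz_mensaje ML)

-- ===== LEMMAS AND PROOFS =====

-- the common normal form: row j is ML at positions j, j+3, …, j+3*(t-1)
def pvRow (ML : List Int) (j t : Nat) : List Int :=
  (List.range t).map (fun i => ML.getD (3 * i + j) 0)

-- partial row after i0 outer iterations of A's loop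
def pvRowP (ML : List Int) (j t i0 : Nat) : List Int :=
  (List.range t).map (fun i => if i < i0 then ML.getD (3 * i + j) 0 else 0)

theorem pvRowP_zero (ML : List Int) (j t : Nat) :
    pvRowP ML j t 0 = List.replicate t 0 := by
  simp [pvRowP, List.map_const']

theorem pvRowP_set (ML : List Int) (j t i0 : Nat) (h : i0 < t) :
    (pvRowP ML j t i0).set i0 (ML.getD (3 * i0 + j) 0) = pvRowP ML j t (i0 + 1) := by
  apply List.ext_getElem
  · simp [pvRowP]
  · intro n h1 h2
    simp only [pvRowP, List.length_map, List.length_range] at h1 h2 ⊢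
    rw [List.getElem_set]
    by_cases hn : i0 = n
    · subst hn; simp
    · simp only [if_neg hn, List.getElem_map, List.getElem_range]
      by_cases hlt : n < i0
      · simp [hlt, Nat.lt_succ_of_lt hlt]
      · have : ¬ n < i0 + 1 := by omega
        simp [hlt, this]

theorem pvRowP_full (ML : List Int) (j t : Nat) : pvRowP ML j t t = pvRow ML j t := by
  unfold pvRowP pvRow
  apply List.map_congr_left
  intro i hi
  simp only [List.mem_range] at hi
  simp [hi]

-- A's fold invariant
theorem pvFoldA (ML : List Int) (t : Nat) (i0 : Nat) (h : i0 ≤ t) :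
    (List.range i0).foldl
      (fun st i => ([0, 1, 2] : List Nat).foldl
        (fun (st : List (List Int) × Nat) j =>
          (st.1.set j ((st.1.getD j []).set i (ML.getD st.2 0)), st.2 + 1)) st)
      ([pvRowP ML 0 t 0, pvRowP ML 1 t 0, pvRowP ML 2 t 0], 0)
    = ([pvRowP ML 0 t i0, pvRowP ML 1 t i0, pvRowP ML 2 t i0], 3 * i0) := by
  induction i0 with
  | zero => simp
  | succ n ih =>
    have hn : n ≤ t := by omega
    rw [List.range_succ, List.foldl_append, ih hn]
    have hlt : n < t := by omega
    simp only [List.foldl_cons, List.foldl_nil,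
      List.getD, List.getElem?_cons_zero, List.getElem?_cons_succ, Option.getD_some,
      List.set_cons_zero, List.set_cons_succ]
    rw [show (ML[3*n]?.getD 0 : Int) = ML.getD (3*n+0) 0 from by simp [List.getD_eq_getElem?_getD],
        show (ML[3*n+1]?.getD 0 : Int) = ML.getD (3*n+1) 0 from by simp [List.getD_eq_getElem?_getD],
        show (ML[3*n+1+1]?.getD 0 : Int) = ML.getD (3*n+2) 0 from by
          simp [List.getD_eq_getElem?_getD]]
    rw [pvRowP_set ML 0 t n hlt, pvRowP_set ML 1 t n hlt, pvRowP_set ML 2 t n hlt]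
    refine Prod.ext ?_ ?_
    · simp
    · simp; omega

theorem matriz_mensaje_eq_rows (ML : List Int) :
    matriz_mensaje ML =
      [pvRow ML 0 (ML.length / 3), pvRow ML 1 (ML.length / 3), pvRow ML 2 (ML.length / 3)] := by
  unfold matriz_mensaje
  rw [show List.range 3 = [0, 1, 2] from by decide]
  simp only [List.map_cons, List.map_nil]
  rw [show (List.replicate (ML.length / 3) (0 : Int)) = pvRowP ML 0 (ML.length / 3) 0 from
        (pvRowP_zero ML 0 _).symm]
  conv_lhs =>
    rw [show [pvRowP ML 0 (ML.length / 3) 0, pvRowP ML 0 (ML.length / 3) 0,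
              pvRowP ML 0 (ML.length / 3) 0]
        = [pvRowP ML 0 (ML.length / 3) 0, pvRowP ML 1 (ML.length / 3) 0,
           pvRowP ML 2 (ML.length / 3) 0] by simp [pvRowP]]
  rw [pvFoldA ML (ML.length / 3) (ML.length / 3) (le_refl _)]
  simp [pvRowP_full]

-- filterMap of an everywhere-some function is a map
theorem pvFilterMap_eq_map {α β : Type} (f : α → Option β) (g : α → β) (l : List α)
    (h : ∀ x ∈ l, f x = some (g x)) : l.filterMap f = l.map g := by
  induction l with
  | nil => rfl
  | cons a l ih =>
    rw [List.filterMap_cons, h a (List.mem_cons_self), List.map_cons,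
      ih (fun x hx => h x (List.mem_cons_of_mem a hx))]

-- B's row j is the normal form
theorem pvSliceRow (ML : List Int) (j : Nat) (hj : j < 3) :
    (PySem.List.slice? ML (some (j : Int)) (some ((3 * (ML.length / 3) : Nat) : Int)) 3).getD []
      = pvRow ML j (ML.length / 3) := by
  have h3t : 3 * (ML.length / 3) ≤ ML.length := Nat.mul_div_le ML.length 3
  set n := ML.length with hn
  set t := n / 3 with ht
  have hj0 : ¬ ((j : Int) < 0) := not_lt.mpr (Int.natCast_nonneg j)
  have h3t0 : ¬ (((3 * t : Nat) : Int) < 0) := not_lt.mpr (Int.natCast_nonneg _)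
  unfold PySem.List.slice? PySem.List.sliceIndices
  simp only [if_neg (by norm_num : (3 : Int) ≠ 0), if_neg (by norm_num : ¬ ((3 : Int) < 0)),
    if_neg hj0, if_neg h3t0, if_pos (by norm_num : (0 : Int) < 3), ← hn]
  have hstop : min ((3 * t : Nat) : Int) (n : Int) = ((3 * t : Nat) : Int) := by
    apply min_eq_left; exact_mod_cast h3t
  rw [hstop]
  by_cases hjn : j ≤ n
  · have hstart : min ((j : Nat) : Int) (n : Int) = (j : Int) := by
      apply min_eq_left; exact_mod_cast hjn
    rw [hstart]
    by_cases hpos : (j : Int) < ((3 * t : Nat) : Int)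
    · have hjt : j < 3 * t := by exact_mod_cast hpos
      rw [if_pos hpos]
      have hcount : ((((3 * t : Nat) : Int) - (j : Int) + 3 - 1) / 3).toNat = t := by
        push_cast; omega
      rw [hcount, Option.getD_some]
      unfold pvRow
      apply pvFilterMap_eq_map
      intro k hk
      simp only [List.mem_range] at hk
      have hidx : ((j : Int) + 3 * (k : Int)).toNat = 3 * k + j := by omega
      rw [hidx]
      have hin : 3 * k + j < n := by omega
      rw [List.getElem?_eq_getElem hin]
      congr 1
      rw [List.getD_eq_getElem?_getD, List.getElem?_eq_getElem hin, Option.getD_some]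
    · -- j ≥ 3*t with j < 3, so t = 0 and both sides are []
      have hjt : 3 * t ≤ j := by
        have := not_lt.mp hpos; exact_mod_cast this
      have ht0 : t = 0 := by omega
      rw [if_neg hpos]
      simp [pvRow, ht0]
  · -- j > n : then n < 3 so t = 0; start clamps to n, stop = 0
    have hn3 : n < 3 := by omega
    have ht0 : t = 0 := by omega
    have hstart : min ((j : Nat) : Int) (n : Int) = (n : Int) := by
      apply min_eq_right; exact_mod_cast (by omega : n ≤ j)
    rw [hstart]
    have hne : ¬ ((n : Int) < ((3 * t : Nat) : Int)) := by
      rw [ht0]; simp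
    rw [if_neg hne]
    simp [pvRow, ht0]

theorem matriz_mensaje_alt_eq_rows (ML : List Int) :
    matriz_mensaje_alt ML =
      [pvRow ML 0 (ML.length / 3), pvRow ML 1 (ML.length / 3), pvRow ML 2 (ML.length / 3)] := by
  unfold matriz_mensaje_alt
  rw [show List.range 3 = [0, 1, 2] from by decide]
  simp only [List.map_cons, List.map_nil, Int.ofNat_eq_natCast]
  rw [pvSliceRow ML 0 (by norm_num), pvSliceRow ML 1 (by norm_num),
    pvSliceRow ML 2 (by norm_num)]

-- ===== VERDICT (by name: the statement is the Claim_ definition above) =====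
theorem matriz_mensaje_spec : Claim_equal_matriz_mensaje := by
  intro ML _
  unfold Spec_matriz_mensaje
  rw [matriz_mensaje_eq_rows, matriz_mensaje_alt_eq_rows]
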